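-- pv_equiv track=rewrite | github.com/iudofia2026/courses-ai | backend/utils/helpers.py | sanitize_query
-- ===== SOURCE A (Python) =====
-- def sanitize_query(query: str) -> str:
--     """
--     Sanitize search query to prevent injection and improve search quality.
--
--     Args:
--         query: Raw search query
--
--     Returns:
--         str: Sanitized query
--     """
--     if not query:
--         return ""
--
--     # Remove potentially harmful characters
--     dangerous_chars = ["<", ">", "{", "}", "[", "]", "(", ")", ";", "'", "\""]
--
--     sanitized = query
--     for char in dangerous_chars:
--         sanitized = sanitized.replace(char, "")
--
--     # Normalize whitespace
--     sanitized = " ".join(sanitized.split())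
--
--     return sanitized.strip()
-- ===== SOURCE B (Python) =====
-- def sanitize_query(query: str) -> str:
--     """Sanitize a search query: drop dangerous chars and collapse whitespace in one fused pass."""
--     if not query:
--         return ""
--     dangerous = {"<", ">", "{", "}", "[", "]", "(", ")", ";", "'", "\""}
--     out = []
--     pending = False
--     for ch in query:
--         if ch in dangerous:
--             continue
--         if ch.isspace():
--             pending = True
--             continue
--         if pending and out:
--             out.append(" ")
--         out.append(ch)
--         pending = False
--     return "".join(out)
-- ===== Notes on version B (the rewrite author's own statement) =====
-- stated objective: alternative
-- what changed: Replaces eleven sequential str.replace scans followed by split/join/strip with a single fused character pass maintaining an output buffer and a pending-space flag.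
import Mathlib
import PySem

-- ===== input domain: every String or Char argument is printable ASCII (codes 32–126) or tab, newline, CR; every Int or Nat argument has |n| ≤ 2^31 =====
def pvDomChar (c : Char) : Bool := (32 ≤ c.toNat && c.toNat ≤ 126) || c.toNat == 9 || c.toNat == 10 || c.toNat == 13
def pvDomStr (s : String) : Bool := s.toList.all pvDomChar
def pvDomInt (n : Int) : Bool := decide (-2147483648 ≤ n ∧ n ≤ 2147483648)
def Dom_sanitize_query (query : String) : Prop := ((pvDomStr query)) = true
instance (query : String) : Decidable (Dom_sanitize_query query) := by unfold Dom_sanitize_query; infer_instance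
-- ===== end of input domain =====

-- B fuses the eleven replace scans + split/join/strip of A into one character pass with a pending-space flag (objective: alternative single-pass decomposition).

-- ===== PORT A =====
def sanitize_query (query : String) : String :=
  if query = "" then ""
  else
    let dangerous_chars : List String := ["<", ">", "{", "}", "[", "]", "(", ")", ";", "'", "\""]
    let sanitized := dangerous_chars.foldl (fun s ch => PySem.Str.replace s ch "") query
    let sanitized := PySem.Str.join " " (PySem.Str.split₀ sanitized)
    PySem.Str.strip sanitized

-- ===== PORT B =====
def pvDangerous (c : Char) : Bool :=
  ['<', '>', '{', '}', '[', ']', '(', ')', ';', '\'', '"'].contains c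

def pvStep (st : List Char × Bool) (c : Char) : List Char × Bool :=
  if pvDangerous c then st
  else if PySem.Chars.isspace c then (st.1, true)
  else ((if st.2 && !st.1.isEmpty then st.1 ++ [' ', c] else st.1 ++ [c]), false)

def sanitize_query_alt (query : String) : String :=
  if query = "" then ""
  else String.ofList (query.toList.foldl pvStep ([], false)).1

-- ===== PRECONDITION & SPEC =====
def Spec_sanitize_query (query : String) (out : String) : Prop := out = sanitize_query_alt query
instance (query : String) (out : String) : Decidable (Spec_sanitize_query query out) := by unfold Spec_sanitize_query; infer_instance

-- ===== CLAIM (what is proved, stated in full; the proofs are below) =====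
def Claim_equal_sanitize_query : Prop := ∀ (query : String), Dom_sanitize_query query → Spec_sanitize_query query (sanitize_query query)

-- ===== LEMMAS AND PROOFS =====

theorem sq_replace_go_filter (d : Char) : ∀ (fuel : Nat) (l acc : List Char), l.length ≤ fuel →
    PySem.Chars.replace.go [d] [] fuel l acc = acc.reverse ++ l.filter (fun c => !(c == d)) := by
  intro fuel
  induction fuel with
  | zero => intro l acc h; interval_cases hl : l.length; · simp_all [PySem.Chars.replace.go, List.length_eq_zero_iff.mp hl]
  | succ n ih =>
    intro l acc h
    cases l with
    | nil => simp [PySem.Chars.replace.go]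
    | cons c t =>
      simp only [PySem.Chars.replace.go]
      by_cases hc : c = d
      · subst hc
        have : List.isPrefixOf [c] (c :: t) = true := by simp [List.isPrefixOf]
        simp only [this]
        rw [ih _ _ (by simpa using Nat.le_of_succ_le_succ h)]
        simp
      · have : List.isPrefixOf [d] (c :: t) = false := by simp [List.isPrefixOf]; exact fun h' => hc h'.symm
        simp only [this]
        rw [ih t (c :: acc) (by simpa using Nat.le_of_succ_le_succ h)]
        simp [hc]

theorem sq_replace_filter (cs : List Char) (d : Char) :
    PySem.Chars.replace cs [d] [] = cs.filter (fun c => !(c == d)) := by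
  simp [PySem.Chars.replace, sq_replace_go_filter d cs.length cs [] (le_refl _)]

theorem sq_step (s : String) (c : Char) (d : String) (hd : d.toList = [c]) :
    (PySem.Str.replace s d "").toList = s.toList.filter (fun x => !(x == c)) := by
  rw [PySem.Str.replace, String.toList_ofList, hd]
  rw [show ("" : String).toList = [] from rfl, sq_replace_filter]

set_option maxRecDepth 4000 in
theorem sq_filtered (s : String) :
    ((["<", ">", "{", "}", "[", "]", "(", ")", ";", "'", "\""] : List String).foldl
      (fun s ch => PySem.Str.replace s ch "") s).toList = s.toList.filter (fun c => !pvDangerous c) := by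
  simp only [List.foldl_cons, List.foldl_nil]
  rw [sq_step _ '\"' _ (by decide), sq_step _ '\'' _ (by decide), sq_step _ ';' _ (by decide),
    sq_step _ ')' _ (by decide), sq_step _ '(' _ (by decide), sq_step _ ']' _ (by decide),
    sq_step _ '[' _ (by decide), sq_step _ '}' _ (by decide), sq_step _ '{' _ (by decide),
    sq_step _ '>' _ (by decide), sq_step _ '<' _ (by decide)]
  simp only [List.filter_filter]
  refine List.filter_congr ?_
  intro c _
  simp only [pvDangerous, List.contains_cons, List.contains_nil, Bool.or_false, Bool.not_or]
  ac_rfl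

-- join helpers
theorem sq_join_cons (sep w : List Char) (ws : List (List Char)) (h : ws ≠ []) :
    PySem.Chars.join sep (w :: ws) = w ++ sep ++ PySem.Chars.join sep ws := by
  cases ws with
  | nil => exact absurd rfl h
  | cons v vs => rw [PySem.Chars.join_cons_cons]

theorem sq_join_concat (sep : List Char) : ∀ (ws : List (List Char)) (w : List Char), ws ≠ [] →
    PySem.Chars.join sep (ws ++ [w]) = PySem.Chars.join sep ws ++ sep ++ w := by
  intro ws
  induction ws with
  | nil => intro w h; exact absurd rfl h
  | cons v vs ih =>
    intro w _
    cases vs with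
    | nil => simp [PySem.Chars.join_cons_cons, PySem.Chars.join_singleton]
    | cons u us =>
      rw [List.cons_append, sq_join_cons _ _ _ (by simp), sq_join_cons _ _ _ (by simp),
        ih w (by simp)]
      simp

theorem sq_join_snoc_extend (sep : List Char) : ∀ (ws : List (List Char)) (w t : List Char),
    PySem.Chars.join sep (ws ++ [w ++ t]) = PySem.Chars.join sep (ws ++ [w]) ++ t := by
  intro ws
  induction ws with
  | nil => intro w t; simp [PySem.Chars.join_singleton]
  | cons v vs ih =>
    intro w t
    rw [List.cons_append, List.cons_append, sq_join_cons _ _ _ (by simp),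
      sq_join_cons _ _ _ (by simp), ih]
    simp

theorem sq_join_ne_nil (sep : List Char) : ∀ (ws : List (List Char)), ws ≠ [] →
    (∀ w ∈ ws, w ≠ []) → PySem.Chars.join sep ws ≠ [] := by
  intro ws
  induction ws with
  | nil => intro h; exact absurd rfl h
  | cons v vs ih =>
    intro _ hw
    cases vs with
    | nil => simpa [PySem.Chars.join_singleton] using hw v (by simp)
    | cons u us =>
      rw [sq_join_cons _ _ _ (by simp)]
      have : v ≠ [] := hw v (by simp)
      intro hcon
      rcases List.append_eq_nil_iff.mp ((List.append_eq_nil_iff).mp hcon).1 with ⟨h1, _⟩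
      exact this h1

-- the main invariant: the one-pass fold computes " ".join of split₀.go
theorem sq_onepass_go : ∀ (ds cur : List Char) (acc : List (List Char)) (out : List Char) (pending : Bool),
    (∀ c ∈ ds, pvDangerous c = false) →
    (∀ w ∈ acc, w ≠ []) →
    (pending = true → cur = []) →
    (pending = false → cur = [] → acc = []) →
    out = PySem.Chars.join [' '] ((if cur.isEmpty then acc else cur.reverse :: acc).reverse) →
    (ds.foldl pvStep (out, pending)).1 =
      PySem.Chars.join [' '] (PySem.Chars.split₀.go ds cur acc) := by
  intro ds
  induction ds with
  | nil =>
    intro cur acc out pending _ _ _ _ hout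
    simp only [List.foldl_nil, PySem.Chars.split₀.go]
    by_cases hc : cur = []
    · subst hc; simpa using hout
    · rw [if_neg (by simpa using hc)]
      rw [if_neg (by simpa using hc)] at hout
      exact hout
  | cons c rest ih =>
    intro cur acc out pending hd hacc hp1 hp0 hout
    have hcd : pvDangerous c = false := hd c (by simp)
    have hd' : ∀ x ∈ rest, pvDangerous x = false := fun x hx => hd x (by simp [hx])
    simp only [List.foldl_cons, PySem.Chars.split₀.go, pvStep, hcd, Bool.false_eq_true, if_false]
    by_cases hsp : PySem.Chars.isspace c = true
    · -- whitespace: set pending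
      rw [if_pos hsp, if_pos hsp]
      by_cases hc : cur = []
      · subst hc
        simp only [List.isEmpty_nil, List.reverse_nil, reduceIte]
        exact ih [] acc out true hd' hacc (fun _ => rfl) (by simp) (by simpa only [List.isEmpty_nil, List.reverse_nil, reduceIte] using hout)
      · rw [if_neg (by simpa using hc)]
        refine ih [] (cur.reverse :: acc) out true hd' ?_ (fun _ => rfl) (by simp) ?_
        · intro w hw
          rcases List.mem_cons.mp hw with rfl | hw
          · simpa using hc
          · exact hacc w hw
        · rw [if_neg (by simpa using hc)] at hout
          simpa using hout
    · -- real character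
      rw [if_neg hsp, if_neg hsp]
      by_cases hpe : pending = true
      · -- pending space: cur = []
        have hc : cur = [] := hp1 hpe
        subst hc; subst hpe
        simp only [List.isEmpty_nil, List.reverse_nil, reduceIte] at hout
        by_cases ha : acc = []
        · subst ha
          simp only [List.reverse_nil, PySem.Chars.join_nil] at hout
          subst hout
          rw [show (if (true && !([] : List Char).isEmpty) = true
              then ([] : List Char) ++ [' ', c] else [] ++ [c]) = [c] by simp]
          refine ih [c] [] [c] false hd' (by simp) (by simp) (by simp) ?_
          simp [PySem.Chars.join_singleton]
        · have hne : out ≠ [] := by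
            rw [hout]; exact sq_join_ne_nil _ _ (by simpa using ha) (by simpa using hacc)
          rw [show (if (true && !out.isEmpty) = true
              then out ++ [' ', c] else out ++ [c]) = out ++ [' ', c] by
            simp [hne]]
          refine ih [c] acc (out ++ [' ', c]) false hd' hacc (by simp) (by simp) ?_
          rw [hout, if_neg (by simp)]
          rw [List.reverse_cons]
          rw [sq_join_concat _ _ _ (by simpa using ha)]
          simp
      · -- not pending: extend the current word
        have hpe' : pending = false := by simpa using hpe
        subst hpe'
        rw [show (if (false && !out.isEmpty) = true
            then out ++ [' ', c] else out ++ [c]) = out ++ [c] by simp]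
        by_cases hc : cur = []
        · have ha : acc = [] := hp0 rfl hc
          subst hc; subst ha
          simp only [List.isEmpty_nil, List.reverse_nil, reduceIte, PySem.Chars.join_nil] at hout
          subst hout
          refine ih [c] [] [c] false hd' (by simp) (by simp) (by simp) ?_
          simp [PySem.Chars.join_singleton]
        · rw [if_neg (by simpa using hc)] at hout
          refine ih (c :: cur) acc (out ++ [c]) false hd' hacc (by simp) (by simp) ?_
          rw [if_neg (by simp)]
          rw [hout, List.reverse_cons, List.reverse_cons, List.reverse_cons,
            show (cur.reverse ++ [c] : List Char) = cur.reverse ++ [c] from rfl]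
          rw [sq_join_snoc_extend [' '] acc.reverse cur.reverse [c]]

-- split₀.go produces nonempty, space-free words
theorem sq_split_go_words : ∀ (ds cur : List Char) (acc : List (List Char)),
    (∀ c ∈ cur, PySem.Chars.isspace c = false) →
    (∀ w ∈ acc, w ≠ [] ∧ ∀ c ∈ w, PySem.Chars.isspace c = false) →
    ∀ w ∈ PySem.Chars.split₀.go ds cur acc,
      w ≠ [] ∧ ∀ c ∈ w, PySem.Chars.isspace c = false := by
  intro ds
  induction ds with
  | nil =>
    intro cur acc hcur hacc w hw
    simp only [PySem.Chars.split₀.go] at hw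
    by_cases hc : cur = []
    · rw [hc] at hw
      simp only [List.isEmpty_nil, List.reverse_nil, reduceIte, List.mem_reverse] at hw
      exact hacc w hw
    · rw [if_neg (by simpa using hc), List.mem_reverse, List.mem_cons] at hw
      rcases hw with rfl | hw
      · exact ⟨by simpa using hc, fun x hx => hcur x (by simpa using hx)⟩
      · exact hacc w hw
  | cons c rest ih =>
    intro cur acc hcur hacc w hw
    simp only [PySem.Chars.split₀.go] at hw
    by_cases hsp : PySem.Chars.isspace c = true
    · rw [if_pos hsp] at hw
      by_cases hc : cur = []
      · rw [hc] at hw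
        simp only [List.isEmpty_nil, List.reverse_nil, reduceIte] at hw
        exact ih [] acc (by simp) hacc w hw
      · rw [if_neg (by simpa using hc)] at hw
        refine ih [] (cur.reverse :: acc) (by simp) ?_ w hw
        intro v hv
        rcases List.mem_cons.mp hv with rfl | hv
        · exact ⟨by simpa using hc, fun x hx => hcur x (by simpa using hx)⟩
        · exact hacc v hv
    · rw [if_neg hsp] at hw
      refine ih (c :: cur) acc ?_ hacc w hw
      intro x hx
      rcases List.mem_cons.mp hx with rfl | hx
      · simpa using hsp
      · exact hcur x hx

theorem sq_strip_id : ∀ (ws : List (List Char)),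
    (∀ w ∈ ws, w ≠ [] ∧ ∀ c ∈ w, PySem.Chars.isspace c = false) →
    PySem.Chars.strip (PySem.Chars.join [' '] ws) = PySem.Chars.join [' '] ws := by
  intro ws hws
  rcases List.eq_nil_or_concat ws with rfl | ⟨vs, v, rfl⟩
  · simp [PySem.Chars.join_nil, PySem.Chars.strip, PySem.Chars.lstrip, PySem.Chars.rstrip]
  simp only [List.concat_eq_append] at hws ⊢
  · -- head character
    have hhead : ∃ a t, PySem.Chars.join [' '] (vs ++ [v]) = a :: t ∧ PySem.Chars.isspace a = false := by
      cases vs with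
      | nil =>
        obtain ⟨hv, hvs⟩ := hws v (by simp)
        rcases List.exists_cons_of_ne_nil hv with ⟨a, t, rfl⟩
        exact ⟨a, t, by simp [PySem.Chars.join_singleton], hvs a (by simp)⟩
      | cons u us =>
        obtain ⟨hu, hus⟩ := hws u (by simp)
        rcases List.exists_cons_of_ne_nil hu with ⟨a, t, rfl⟩
        refine ⟨a, t ++ [' '] ++ PySem.Chars.join [' '] (us ++ [v]), ?_, hus a (by simp)⟩
        rw [List.cons_append, sq_join_cons _ _ _ (by simp)]
        simp
    -- last character
    have hlast : ∃ s b, PySem.Chars.join [' '] (vs ++ [v]) = s ++ [b] ∧ PySem.Chars.isspace b = false := by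
      obtain ⟨hv, hvs⟩ := hws v (by simp)
      rcases List.eq_nil_or_concat v with rfl | ⟨v', b, rfl⟩
      · exact absurd rfl hv
      simp only [List.concat_eq_append] at hvs ⊢
      cases vs with
      | nil =>
        exact ⟨v', b, by simp [PySem.Chars.join_singleton], hvs b (by simp)⟩
      | cons u us =>
        refine ⟨PySem.Chars.join [' '] (u :: us) ++ [' '] ++ v', b, ?_, hvs b (by simp)⟩
        rw [sq_join_concat [' '] (u :: us) (v' ++ [b]) (by simp)]
        simp
    obtain ⟨a, t, he, ha⟩ := hhead
    obtain ⟨s, b, he2, hb⟩ := hlast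
    unfold PySem.Chars.strip PySem.Chars.lstrip PySem.Chars.rstrip
    rw [he, List.dropWhile_cons, if_neg (by simp [ha]), ← he, he2]
    simp [hb]

theorem sq_fold_filter : ∀ (cs : List Char) (st : List Char × Bool),
    cs.foldl pvStep st = (cs.filter (fun c => !pvDangerous c)).foldl pvStep st := by
  intro cs
  induction cs with
  | nil => intro st; rfl
  | cons c t ih =>
    intro st
    by_cases hc : pvDangerous c
    · have hstep : pvStep st c = st := by simp [pvStep, hc]
      simp only [List.foldl_cons, List.filter_cons, hc, Bool.not_true, Bool.false_eq_true,
        if_false, hstep]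
      exact ih st
    · have hc' : pvDangerous c = false := by simpa using hc
      simp only [List.foldl_cons, List.filter_cons, hc', Bool.not_false, if_true]
      exact ih (pvStep st c)

theorem sq_core (cs : List Char) :
    PySem.Chars.strip (PySem.Chars.join [' ']
        (PySem.Chars.split₀ (cs.filter (fun c => !pvDangerous c)))) =
      ((cs.filter (fun c => !pvDangerous c)).foldl pvStep ([], false)).1 := by
  set ds := cs.filter (fun c => !pvDangerous c) with hds
  have hdang : ∀ c ∈ ds, pvDangerous c = false := by
    intro c hc
    rw [hds] at hc
    simpa using (List.mem_filter.mp hc).2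
  simp only [PySem.Chars.split₀]
  rw [sq_strip_id _ (sq_split_go_words ds [] [] (by simp) (by simp))]
  exact (sq_onepass_go ds [] [] [] false hdang (by simp) (by simp) (by simp)
    (by simp [PySem.Chars.join_nil])).symm

-- ===== VERDICT (by name: the statement is the Claim_ definition above) =====
theorem sanitize_query_spec : Claim_equal_sanitize_query := by
  intro query _
  unfold Spec_sanitize_query sanitize_query sanitize_query_alt
  by_cases hq : query = ""
  · simp [hq]
  · simp only [hq, if_false]
    rw [PySem.Str.strip, PySem.Str.join, PySem.Str.split₀]
    refine congrArg String.ofList ?_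
    rw [String.toList_ofList]
    rw [show (" " : String).toList = [' '] from rfl]
    rw [List.map_map]
    rw [show (String.toList ∘ String.ofList) = id from funext fun l => by simp]
    rw [List.map_id]
    rw [sq_filtered]
    rw [sq_fold_filter query.toList ([], false)]
    exact sq_core query.toList
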